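-- pv_equiv track=rewrite | github.com/Drac1018/trading-bot | backend/trading_mvp/services/settings.py | _prioritize_blocked_reasons
-- ===== SOURCE A (Python) =====
-- STALE_FIRST_REASON_PRIORITY = {
--     "USER_STREAM_LISTEN_KEY_ROTATION_PENDING": -1,
--     "ACCOUNT_STATE_STALE": 0,
--     "POSITION_STATE_STALE": 1,
--     "OPEN_ORDERS_STATE_STALE": 2,
--     "PROTECTION_STATE_UNVERIFIED": 3,
--     "EXCHANGE_ACCOUNT_STATE_UNAVAILABLE": 4,
--     "EXCHANGE_POSITION_SYNC_FAILED": 5,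
--     "EXCHANGE_OPEN_ORDERS_SYNC_FAILED": 6,
--     "TEMPORARY_SYNC_FAILURE": 7,
--     "EXCHANGE_CONNECTIVITY_TEMPORARY_FAILURE": 8,
--     "LIVE_CREDENTIALS_MISSING": 9,
--     "STALE_MARKET_DATA": 10,
--     "MARKET_STATE_STALE": 10,
--     "INCOMPLETE_MARKET_DATA": 11,
--     "MARKET_STATE_INCOMPLETE": 11,
-- }
--
-- def _prioritize_blocked_reasons(reason_codes: list[str]) -> list[str]:
--     unique: list[str] = []
--     for code in reason_codes:
--         normalized = str(code or "").strip()
--         if normalized and normalized not in unique: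
--             unique.append(normalized)
--     return sorted(
--         unique,
--         key=lambda code: (STALE_FIRST_REASON_PRIORITY.get(code, 100), unique.index(code)),
--     )
-- ===== SOURCE B (Python) =====
-- STALE_FIRST_REASON_PRIORITY = {
--     "USER_STREAM_LISTEN_KEY_ROTATION_PENDING": -1,
--     "ACCOUNT_STATE_STALE": 0,
--     "POSITION_STATE_STALE": 1,
--     "OPEN_ORDERS_STATE_STALE": 2,
--     "PROTECTION_STATE_UNVERIFIED": 3,
--     "EXCHANGE_ACCOUNT_STATE_UNAVAILABLE": 4,
--     "EXCHANGE_POSITION_SYNC_FAILED": 5,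
--     "EXCHANGE_OPEN_ORDERS_SYNC_FAILED": 6,
--     "TEMPORARY_SYNC_FAILURE": 7,
--     "EXCHANGE_CONNECTIVITY_TEMPORARY_FAILURE": 8,
--     "LIVE_CREDENTIALS_MISSING": 9,
--     "STALE_MARKET_DATA": 10,
--     "MARKET_STATE_STALE": 10,
--     "INCOMPLETE_MARKET_DATA": 11,
--     "MARKET_STATE_INCOMPLETE": 11,
-- }
--
--
-- def _prioritize_blocked_reasons(reason_codes: list[str]) -> list[str]:
--     # Single dedup pass fills priority buckets; output is the buckets in
--     # ascending priority, each keeping first-seen order (sort is stable).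
--     seen: set[str] = set()
--     buckets: dict[int, list[str]] = {}
--     for code in reason_codes:
--         normalized = str(code or "").strip()
--         if normalized and normalized not in seen:
--             seen.add(normalized)
--             buckets.setdefault(
--                 STALE_FIRST_REASON_PRIORITY.get(normalized, 100), []
--             ).append(normalized)
--     result: list[str] = []
--     for priority in sorted(buckets):
--         result.extend(buckets[priority])
--     return result
-- ===== Notes on version B (the rewrite author's own statement) =====
-- stated objective: faster
-- what changed: A dedups into a list (linear membership test) and then comparison-sorts it with a (priority, unique.index(code)) tuple key, rescanning the list inside the key; B never sorts the codes: one dedup pass over a set appends each new code to its priority bucket in a dict, and the result is emitted by walking the sorted bucket keys, ties resolved by bucket order instead of an index key.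
import Mathlib
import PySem

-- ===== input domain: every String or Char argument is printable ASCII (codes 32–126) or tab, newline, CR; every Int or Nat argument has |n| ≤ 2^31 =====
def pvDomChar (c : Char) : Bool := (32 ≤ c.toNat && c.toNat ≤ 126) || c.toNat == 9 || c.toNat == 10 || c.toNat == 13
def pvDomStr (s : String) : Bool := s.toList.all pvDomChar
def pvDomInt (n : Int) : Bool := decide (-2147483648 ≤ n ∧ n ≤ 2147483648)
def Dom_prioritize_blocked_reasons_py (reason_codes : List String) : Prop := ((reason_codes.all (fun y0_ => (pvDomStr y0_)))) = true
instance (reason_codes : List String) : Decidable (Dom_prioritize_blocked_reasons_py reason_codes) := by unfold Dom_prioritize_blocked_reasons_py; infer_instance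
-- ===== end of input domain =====

-- B replaces A's comparison sort over (priority, first-seen index) tuple keys by a single
-- dedup pass that fills per-priority buckets, emitted in ascending priority (measured faster).

-- module constant STALE_FIRST_REASON_PRIORITY (shared by A and B)
def pvPrio : PySem.Dict String Int := PySem.Dict.ofList [
  ("USER_STREAM_LISTEN_KEY_ROTATION_PENDING", -1),
  ("ACCOUNT_STATE_STALE", 0),
  ("POSITION_STATE_STALE", 1),
  ("OPEN_ORDERS_STATE_STALE", 2),
  ("PROTECTION_STATE_UNVERIFIED", 3),
  ("EXCHANGE_ACCOUNT_STATE_UNAVAILABLE", 4),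
  ("EXCHANGE_POSITION_SYNC_FAILED", 5),
  ("EXCHANGE_OPEN_ORDERS_SYNC_FAILED", 6),
  ("TEMPORARY_SYNC_FAILURE", 7),
  ("EXCHANGE_CONNECTIVITY_TEMPORARY_FAILURE", 8),
  ("LIVE_CREDENTIALS_MISSING", 9),
  ("STALE_MARKET_DATA", 10),
  ("MARKET_STATE_STALE", 10),
  ("INCOMPLETE_MARKET_DATA", 11),
  ("MARKET_STATE_INCOMPLETE", 11)]

-- ===== PORT A =====
def prioritize_blocked_reasons_py (reason_codes : List String) : List String :=
  let unique := reason_codes.foldl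
    (fun (unique : List String) code =>
      -- str(code or "") is the identity on a str argument, so normalized = code.strip()
      let normalized := PySem.Str.strip code
      if normalized ≠ "" ∧ normalized ∉ unique then unique ++ [normalized] else unique) []
  -- key = (STALE_FIRST_REASON_PRIORITY.get(code, 100), unique.index(code));
  -- list.index never raises here since sorted applies the key only to members of unique
  PySem.List.sorted2 unique (fun code => pvPrio.getD code 100)
    (fun code => (PySem.List.index? unique code).getD 0) false

-- ===== PORT B =====
def prioritize_blocked_reasons_py_alt (reason_codes : List String) : List String :=
  let st := reason_codes.foldl
    (fun (st : PySem.Set String × PySem.Dict Int (List String)) code =>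
      let normalized := PySem.Str.strip code
      if normalized ≠ "" ∧ normalized ∉ st.1 then
        (PySem.Set.add st.1 normalized,
         st.2.modify (pvPrio.getD normalized 100) [] (fun b => b ++ [normalized]))
      else st)
    (PySem.Set.empty, PySem.Dict.empty)
  (PySem.List.sorted st.2.keys (fun p => p) false).foldl
    (fun out p => out ++ st.2.getD p []) []

-- ===== PRECONDITION & SPEC =====
def Spec_prioritize_blocked_reasons_py (reason_codes : List String) (out : List String) : Prop := out = prioritize_blocked_reasons_py_alt reason_codes
instance (reason_codes : List String) (out : List String) : Decidable (Spec_prioritize_blocked_reasons_py reason_codes out) := by unfold Spec_prioritize_blocked_reasons_py; infer_instance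

-- ===== CLAIM (what is proved, stated in full; the proofs are below) =====
def Claim_equal_prioritize_blocked_reasons_py : Prop := ∀ (reason_codes : List String), Dom_prioritize_blocked_reasons_py reason_codes → Spec_prioritize_blocked_reasons_py reason_codes (prioritize_blocked_reasons_py reason_codes)

-- ===== LEMMAS AND PROOFS =====

-- abbreviations for the two loop bodies and the bucket builder (proof-only helpers)
def pvStepA (u : List String) (code : String) : List String :=
  let normalized := PySem.Str.strip code
  if normalized ≠ "" ∧ normalized ∉ u then u ++ [normalized] else u

def pvPrioOf (x : String) : Int := pvPrio.getD x 100

def pvG (d : PySem.Dict Int (List String)) (x : String) : PySem.Dict Int (List String) :=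
  d.modify (pvPrioOf x) [] (fun b => b ++ [x])

def pvMkB (u : List String) : PySem.Dict Int (List String) :=
  u.foldl pvG PySem.Dict.empty

-- sorted2 with Int/Nat keys is sorted with the lexicographic pair key
theorem pv_sorted2_eq_sorted_lex {α : Type} (xs : List α) (k1 : α → Int) (k2 : α → Nat) :
    PySem.List.sorted2 xs k1 k2 false
      = PySem.List.sorted xs (fun x => toLex (k1 x, k2 x)) false := by
  unfold PySem.List.sorted2 PySem.List.sorted
  simp only [if_neg (by simp : ¬ (false = true))]
  congr 1
  funext acc x
  congr 1
  funext a b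
  simp only [Prod.Lex.lt_iff, ofLex_toLex]
  rcases lt_trichotomy (k1 a) (k1 b) with h|h|h
  · simp [h]
  · simp [h]
  · simp only [asymm h, h.ne', false_and, or_false, Bool.false_or, decide_false]
    simp [not_le.2 h]

-- Dict.contains agrees with membership-testing the key list
theorem pv_contains_eq_keys {ν : Type} (d : PySem.Dict Int ν) (k : Int) :
    d.contains k = d.keys.contains k := by
  show (d.items.any fun p => p.1 == k) = (d.items.map Prod.fst).contains k
  induction d.items with
  | nil => rfl
  | cons h t ih =>
    have hk : (k == h.1) = (h.1 == k) := by
      by_cases hk : k = h.1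
      · simp [hk]
      · simp [hk, Ne.symm hk]
    simp only [List.any_cons, List.map_cons, List.contains_cons, ih, hk]

theorem pv_keys_modify {ν : Type} (d : PySem.Dict Int ν) (k : Int) (dflt : ν) (f : ν → ν) :
    (d.modify k dflt f).keys = PySem.Set.add d.keys k := by
  show (d.insert k (f (d.getD k dflt))).keys = PySem.Set.add d.keys k
  unfold PySem.Set.add PySem.Set.contains
  rw [← pv_contains_eq_keys]
  by_cases hc : d.contains k = true
  · simp only [hc]
    simp only [PySem.Dict.insert, hc]
    show List.map Prod.fst (List.map _ d.items) = List.map Prod.fst d.items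
    rw [List.map_map]
    apply List.map_congr_left
    intro p _
    by_cases hp : (p.1 == k) = true <;> simp [Function.comp, hp]
    exact (beq_iff_eq.mp hp).symm
  · have hc' : d.contains k = false := by simpa using hc
    simp only [hc', PySem.Dict.insert, Bool.false_eq_true, if_false]
    show List.map Prod.fst (d.items ++ [(k, _)]) = List.map Prod.fst d.items ++ [k]
    simp

theorem pv_getD_modify (d : PySem.Dict Int (List String)) (k p : Int)
    (f : List String → List String) :
    (d.modify k [] f).getD p [] = if p = k then f (d.getD k []) else d.getD p [] := by
  show (d.insert k (f (d.getD k []))).getD p [] = _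
  rw [PySem.Dict.getD_insert]

-- the bucket dict's keys are the distinct priorities in first-seen order
theorem pv_keys_mkB (u : List String) (d : PySem.Dict Int (List String)) :
    (u.foldl pvG d).keys = (u.map pvPrioOf).foldl PySem.Set.add d.keys := by
  induction u generalizing d with
  | nil => rfl
  | cons x t ih =>
    rw [List.foldl_cons, ih, List.map_cons, List.foldl_cons]
    congr 1
    simpa [pvG] using pv_keys_modify d (pvPrioOf x) [] (fun b => b ++ [x])

-- each bucket holds exactly the codes of its priority, in order
theorem pv_getD_mkB (u : List String) (d : PySem.Dict Int (List String)) (p : Int) :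
    (u.foldl pvG d).getD p [] = d.getD p [] ++ u.filter (fun x => pvPrioOf x == p) := by
  induction u generalizing d with
  | nil => simp
  | cons x t ih =>
    rw [List.foldl_cons, ih]
    by_cases h : pvPrioOf x = p
    · rw [List.filter_cons_of_pos (by simp [h])]
      show (pvG d x).getD p [] ++ _ = _
      rw [pvG, pv_getD_modify, if_pos h.symm, h]
      simp
    · rw [List.filter_cons_of_neg (by simp [h])]
      show (pvG d x).getD p [] ++ _ = _
      rw [pvG, pv_getD_modify, if_neg (fun hh : p = pvPrioOf x => h hh.symm)]

-- B's single loop computes A's unique list together with its buckets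
theorem pv_fold_pair (rcs : List String) (u : List String) :
    rcs.foldl
      (fun (st : PySem.Set String × PySem.Dict Int (List String)) code =>
        let normalized := PySem.Str.strip code
        if normalized ≠ "" ∧ normalized ∉ st.1 then
          (PySem.Set.add st.1 normalized,
           st.2.modify (pvPrio.getD normalized 100) [] (fun b => b ++ [normalized]))
        else st)
      (u, pvMkB u)
      = (rcs.foldl pvStepA u, pvMkB (rcs.foldl pvStepA u)) := by
  induction rcs generalizing u with
  | nil => rfl
  | cons code t ih =>
    rw [List.foldl_cons, List.foldl_cons]
    by_cases h : PySem.Str.strip code ≠ "" ∧ PySem.Str.strip code ∉ u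
    · have hadd : PySem.Set.add u (PySem.Str.strip code) = u ++ [PySem.Str.strip code] := by
        unfold PySem.Set.add PySem.Set.contains
        rw [if_neg (by simpa using h.2)]
      have hstep : pvStepA u code = u ++ [PySem.Str.strip code] := by
        unfold pvStepA
        exact if_pos h
      have hmk : pvMkB (u ++ [PySem.Str.strip code])
          = (pvMkB u).modify (pvPrio.getD (PySem.Str.strip code) 100) [] (fun b => b ++ [PySem.Str.strip code]) := by
        unfold pvMkB
        rw [List.foldl_append]
        simp [pvG, pvPrioOf]
      simp only [if_pos h, hadd, hstep, ← hmk]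
      exact ih (u ++ [PySem.Str.strip code])
    · have hstep : pvStepA u code = u := by
        unfold pvStepA
        exact if_neg h
      simp only [if_neg h, hstep]
      exact ih u

theorem pv_nodup_foldA (rcs : List String) (u : List String) (h : u.Nodup) :
    (rcs.foldl pvStepA u).Nodup := by
  induction rcs generalizing u with
  | nil => exact h
  | cons code t ih =>
    rw [List.foldl_cons]
    apply ih
    unfold pvStepA
    by_cases hc : PySem.Str.strip code ≠ "" ∧ PySem.Str.strip code ∉ u
    · rw [if_pos hc]
      simp only [List.nodup_append, h, List.nodup_singleton, true_and]
      intro a ha b hb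
      simp only [List.mem_singleton] at hb
      subst hb
      exact fun hab => hc.2 (by rwa [hab] at ha)
    · rw [if_neg hc]
      exact h

-- on a duplicate-free list, first-seen indices are strictly increasing
theorem pv_idx_pairwise (u : List String) (h : u.Nodup) :
    u.Pairwise (fun a b => (PySem.List.index? u a).getD 0 < (PySem.List.index? u b).getD 0) := by
  rw [List.pairwise_iff_getElem]
  intro i j hi hj hij
  have hidx : ∀ (i : Nat) (hi : i < u.length), PySem.List.index? u u[i] = some i := by
    intro i hi
    rw [PySem.List.index?_eq_idxOf?, List.idxOf?_eq_some_iff]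
    exact ⟨hi, rfl, fun j hj hju => by
      have := (List.Nodup.getElem_inj_iff h).mp hju
      omega⟩
  rw [hidx i hi, hidx j hj]
  simpa using hij

-- concatenating the per-priority filters over a covering duplicate-free key list permutes u
theorem pv_flat_filter_perm (ks : List Int) (u : List String) (hnd : ks.Nodup)
    (hcov : ∀ x ∈ u, pvPrioOf x ∈ ks) :
    (ks.flatMap (fun p => u.filter (fun x => pvPrioOf x == p))).Perm u := by
  induction ks generalizing u with
  | nil =>
    have : u = [] := by
      cases u with
      | nil => rfl
      | cons x t => exact absurd (hcov x (by simp)) (by simp)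
    simp [this]
  | cons p ks ih =>
    rw [List.flatMap_cons]
    have hne : ∀ q ∈ ks, q ≠ p := fun q hq hqp => (List.nodup_cons.mp hnd).1 (hqp ▸ hq)
    have hsplit : (u.filter (fun x => pvPrioOf x == p)
        ++ u.filter (fun x => !(pvPrioOf x == p))).Perm u :=
      List.filter_append_perm _ u
    have hcong : ks.flatMap (fun q => u.filter (fun x => pvPrioOf x == q))
        = ks.flatMap (fun q => (u.filter (fun x => !(pvPrioOf x == p))).filter
            (fun x => pvPrioOf x == q)) := by
      rw [List.flatMap_def, List.flatMap_def]
      congr 1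
      apply List.map_congr_left
      intro q hq
      rw [List.filter_filter]
      refine (List.filter_congr ?_).symm
      intro x _
      by_cases hx : pvPrioOf x = q
      · simp [hx, hne q hq]
      · simp [hx]
    have hrec : (ks.flatMap (fun q => u.filter (fun x => pvPrioOf x == q))).Perm
        (u.filter (fun x => !(pvPrioOf x == p))) := by
      rw [hcong]
      apply ih _ (List.nodup_cons.mp hnd).2
      intro x hx
      have hxu := List.mem_of_mem_filter hx
      have hnep : pvPrioOf x ≠ p := by simpa using List.of_mem_filter hx
      rcases List.mem_cons.mp (hcov x hxu) with hc | hc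
      · exact absurd hc hnep
      · exact hc
    exact (List.Perm.append_left _ hrec).trans hsplit

theorem pv_main (rcs : List String) :
    prioritize_blocked_reasons_py rcs = prioritize_blocked_reasons_py_alt rcs := by
  have hnd : (rcs.foldl pvStepA []).Nodup := pv_nodup_foldA rcs [] List.nodup_nil
  set u := rcs.foldl pvStepA [] with hu
  set ks := PySem.List.sorted (PySem.Set.ofList (u.map pvPrioOf)) (fun p => p) false with hks
  have hks_lt : ks.Pairwise (· < ·) := PySem.List.sorted_ofList_pairwise_lt _
  have hks_nd : ks.Nodup := hks_lt.imp ne_of_lt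
  have hks_mem : ∀ x ∈ u, pvPrioOf x ∈ ks := by
    intro x hx
    rw [hks, PySem.List.mem_sorted]
    exact (PySem.Set.mem_ofList _ _).mpr (List.mem_map_of_mem hx)
  set ys := ks.flatMap (fun p => u.filter (fun x => pvPrioOf x == p)) with hys
  have hperm : ys.Perm u := pv_flat_filter_perm ks u hks_nd hks_mem
  have hpair : ys.Pairwise (fun a b =>
      toLex (pvPrioOf a, (PySem.List.index? u a).getD 0)
        < toLex (pvPrioOf b, (PySem.List.index? u b).getD 0)) := by
    rw [hys, List.flatMap_def, List.pairwise_flatten]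
    constructor
    · intro l hl
      rw [List.mem_map] at hl
      obtain ⟨p, hp, rfl⟩ := hl
      have hsub : (u.filter (fun x => pvPrioOf x == p)).Pairwise
          (fun a b => (PySem.List.index? u a).getD 0 < (PySem.List.index? u b).getD 0) :=
        (pv_idx_pairwise u hnd).sublist List.filter_sublist
      refine hsub.imp_of_mem ?_
      intro a b ha hb hab
      have hpa := beq_iff_eq.mp (List.mem_filter.mp ha).2
      have hpb := beq_iff_eq.mp (List.mem_filter.mp hb).2
      rw [Prod.Lex.lt_iff]
      simp only [ofLex_toLex]
      exact Or.inr ⟨by rw [hpa, hpb], hab⟩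
    · rw [List.pairwise_map]
      refine hks_lt.imp_of_mem ?_
      intro p q hp hq hpq x hx y hy
      have hpx := beq_iff_eq.mp (List.mem_filter.mp hx).2
      have hqy := beq_iff_eq.mp (List.mem_filter.mp hy).2
      rw [Prod.Lex.lt_iff]
      simp only [ofLex_toLex]
      exact Or.inl (by rw [hpx, hqy]; exact hpq)
  have hA : prioritize_blocked_reasons_py rcs
      = PySem.List.sorted u (fun x => toLex (pvPrioOf x, (PySem.List.index? u x).getD 0)) false := by
    show PySem.List.sorted2 u pvPrioOf (fun code => (PySem.List.index? u code).getD 0) false = _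
    exact pv_sorted2_eq_sorted_lex u pvPrioOf _
  have hst : rcs.foldl
      (fun (st : PySem.Set String × PySem.Dict Int (List String)) code =>
        let normalized := PySem.Str.strip code
        if normalized ≠ "" ∧ normalized ∉ st.1 then
          (PySem.Set.add st.1 normalized,
           st.2.modify (pvPrio.getD normalized 100) [] (fun b => b ++ [normalized]))
        else st)
      (PySem.Set.empty, PySem.Dict.empty) = (u, pvMkB u) := pv_fold_pair rcs []
  have hB : prioritize_blocked_reasons_py_alt rcs = ys := by
    show (PySem.List.sorted (rcs.foldl
      (fun (st : PySem.Set String × PySem.Dict Int (List String)) code =>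
        let normalized := PySem.Str.strip code
        if normalized ≠ "" ∧ normalized ∉ st.1 then
          (PySem.Set.add st.1 normalized,
           st.2.modify (pvPrio.getD normalized 100) [] (fun b => b ++ [normalized]))
        else st)
      (PySem.Set.empty, PySem.Dict.empty)).2.keys (fun p => p) false).foldl
        (fun out p => out ++ (rcs.foldl
      (fun (st : PySem.Set String × PySem.Dict Int (List String)) code =>
        let normalized := PySem.Str.strip code
        if normalized ≠ "" ∧ normalized ∉ st.1 then
          (PySem.Set.add st.1 normalized,
           st.2.modify (pvPrio.getD normalized 100) [] (fun b => b ++ [normalized]))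
        else st)
      (PySem.Set.empty, PySem.Dict.empty)).2.getD p []) [] = ys
    rw [hst]
    have hkeys : (pvMkB u).keys = PySem.Set.ofList (u.map pvPrioOf) := by
      show (u.foldl pvG PySem.Dict.empty).keys = _
      rw [pv_keys_mkB, PySem.Set.ofList_eq_foldl]
      rfl
    rw [PySem.List.foldl_append_eq_flatMap]
    rw [hkeys, hys, ← hks, hks]
    rw [List.nil_append, List.flatMap_def, List.flatMap_def]
    congr 1
    apply List.map_congr_left
    intro p _
    show (u.foldl pvG PySem.Dict.empty).getD p [] = _
    rw [pv_getD_mkB]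
    rfl
  rw [hA, hB]
  exact PySem.List.sorted_eq_of_perm_of_pairwise_lt u ys _ hperm hpair

-- ===== VERDICT (by name: the statement is the Claim_ definition above) =====
theorem prioritize_blocked_reasons_py_spec : Claim_equal_prioritize_blocked_reasons_py := by
  intro rcs _
  unfold Spec_prioritize_blocked_reasons_py
  exact pv_main rcs
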